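-- pv_equiv track=rewrite | github.com/UCLA-Security-and-Privacy-Lab/Cosmic | WebformExtraction/webarena/pipeline_integration/scripts/textbox_fields_extraction.py | count_static_text_before_first_input
-- ===== SOURCE A (Python) =====
-- def count_static_text_before_first_input(elements):
--     count = 0
--     for element in elements:
--         if element.get("type") == "text" and element.get("tag") == "input":
--             break
--         if element.get("type") == "static_text":
--             count += 1
--     return count
-- ===== SOURCE B (Python) =====
-- def count_static_text_before_first_input(elements):
--     idx = next((i for i, e in enumerate(elements)
--                 if e.get("type") == "text" and e.get("tag") == "input"),
--                len(elements))
--     return sum(1 for e in elements[:idx] if e.get("type") == "static_text")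
-- ===== Notes on version B (the rewrite author's own statement) =====
-- stated objective: alternative
-- what changed: Replaces A's single interleaved loop (count while scanning, break at first text input) with a two-phase decomposition: first locate the index of the first text-input element (or len), then count static_text in the slice before it.
import Mathlib
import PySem

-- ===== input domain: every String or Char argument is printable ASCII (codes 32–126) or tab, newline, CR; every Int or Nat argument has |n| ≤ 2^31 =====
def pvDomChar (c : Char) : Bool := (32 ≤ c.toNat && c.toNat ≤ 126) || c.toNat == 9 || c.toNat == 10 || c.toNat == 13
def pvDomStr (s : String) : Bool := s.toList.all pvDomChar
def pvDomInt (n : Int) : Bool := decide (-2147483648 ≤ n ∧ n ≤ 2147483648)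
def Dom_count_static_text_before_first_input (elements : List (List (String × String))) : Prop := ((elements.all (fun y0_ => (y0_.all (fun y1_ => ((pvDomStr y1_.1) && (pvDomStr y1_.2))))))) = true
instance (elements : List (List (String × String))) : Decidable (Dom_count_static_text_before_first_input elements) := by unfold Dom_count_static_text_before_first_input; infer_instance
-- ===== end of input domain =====

-- B replaces A's single interleaved count/break loop by a two-phase decomposition
-- (find the index of the first text input, then count static_text in the prefix); alternative, not faster.

-- ===== PORT A =====
-- element.get("type") == "text" and element.get("tag") == "input"
def pvIsInput (e : List (String × String)) : Bool :=
  (PySem.Dict.get? (PySem.Dict.mk e) "type" == some "text") && (PySem.Dict.get? (PySem.Dict.mk e) "tag" == some "input")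

-- element.get("type") == "static_text"
def pvIsStatic (e : List (String × String)) : Bool :=
  PySem.Dict.get? (PySem.Dict.mk e) "type" == some "static_text"

-- A's for-loop with break, carried accumulator `count`
def pvALoop (count : Int) : List (List (String × String)) → Int
  | [] => count
  | e :: rest =>
    if pvIsInput e then count
    else pvALoop (count + (if pvIsStatic e then 1 else 0)) rest

def count_static_text_before_first_input (elements : List (List (String × String))) : Int :=
  pvALoop 0 elements

-- ===== PORT B =====
def count_static_text_before_first_input_alt (elements : List (List (String × String))) : Int :=
  -- idx = next((i for i,e in enumerate(elements) if <is text input>), len(elements))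
  let idx := (elements.findIdx? pvIsInput).getD elements.length
  -- sum(1 for e in elements[:idx] if e.get("type") == "static_text")
  ((elements.take idx).countP pvIsStatic : Int)

-- ===== PRECONDITION & SPEC =====
def Spec_count_static_text_before_first_input (elements : List (List (String × String))) (out : Int) : Prop := out = count_static_text_before_first_input_alt elements
instance (elements : List (List (String × String))) (out : Int) : Decidable (Spec_count_static_text_before_first_input elements out) := by unfold Spec_count_static_text_before_first_input; infer_instance

-- ===== CLAIM (what is proved, stated in full; the proofs are below) =====
def Claim_equal_count_static_text_before_first_input : Prop := ∀ (elements : List (List (String × String))), Dom_count_static_text_before_first_input elements → Spec_count_static_text_before_first_input elements (count_static_text_before_first_input elements)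

-- ===== LEMMAS AND PROOFS =====
theorem pvALoop_eq (xs : List (List (String × String))) :
    ∀ c : Int, pvALoop c xs = c + ((xs.take ((xs.findIdx? pvIsInput).getD xs.length)).countP pvIsStatic : Int) := by
  induction xs with
  | nil => intro c; simp [pvALoop]
  | cons e rest ih =>
    intro c
    by_cases h : pvIsInput e
    · simp [pvALoop, h, List.findIdx?_cons]
    · have hstep : ((e :: rest).findIdx? pvIsInput).getD (e :: rest).length
          = (rest.findIdx? pvIsInput).getD rest.length + 1 := by
        cases hr : rest.findIdx? pvIsInput with
        | none => simp [List.findIdx?_cons, h, hr]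
        | some j => simp [List.findIdx?_cons, h, hr]
      rw [hstep]
      simp only [List.take_succ_cons, List.countP_cons, pvALoop, h, ih]
      by_cases hs : pvIsStatic e <;> simp [hs] <;> ring

-- ===== VERDICT (by name: the statement is the Claim_ definition above) =====
theorem count_static_text_before_first_input_spec : Claim_equal_count_static_text_before_first_input := by
  intro elements _
  unfold Spec_count_static_text_before_first_input count_static_text_before_first_input
    count_static_text_before_first_input_alt
  rw [pvALoop_eq]
  simp
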